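-- pv_equiv track=rewrite | github.com/NMWDI/airbyte | airbyte-integrations/connectors/source-hydrovuapi/source_hydrovuapi/source.py | chunk_dates
-- ===== SOURCE A (Python) =====
-- from typing import List, Any, Mapping, Optional, Iterable, Tuple, MutableMapping
--
-- def chunk_dates(start_date_ts: int, end_date_ts: int) -> Iterable[Tuple[int, int]]:
--     _SLICE_RANGE = 365
--     step = int(_SLICE_RANGE * 24 * 60 * 60)
--     after_ts = start_date_ts
--     while after_ts < end_date_ts:
--         before_ts = min(end_date_ts, after_ts + step)
--         yield after_ts, before_ts
--         after_ts = before_ts + 1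
-- ===== SOURCE B (Python) =====
-- def chunk_dates(start_date_ts: int, end_date_ts: int):
--     step = int(365 * 24 * 60 * 60)
--     span = end_date_ts - start_date_ts
--     if span <= 0:
--         return
--     n = -(-span // (step + 1))  # total number of chunks, by ceiling division
--     for i in range(n - 1):      # every chunk but the last is full-length: no clamping
--         a = start_date_ts + i * (step + 1)
--         yield a, a + step
--     last = start_date_ts + (n - 1) * (step + 1)
--     yield last, min(end_date_ts, last + step)
-- ===== Notes on version B (the rewrite author's own statement) =====
-- stated objective: alternative
-- what changed: Replaced A's stateful while-loop threading after_ts = before_ts + 1 by a closed-form count: B computes the number of chunks n with ceiling division, emits the n-1 full-length chunks directly from their index (no clamping, no running state), and emits the single clamped last chunk separately.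
import Mathlib
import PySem

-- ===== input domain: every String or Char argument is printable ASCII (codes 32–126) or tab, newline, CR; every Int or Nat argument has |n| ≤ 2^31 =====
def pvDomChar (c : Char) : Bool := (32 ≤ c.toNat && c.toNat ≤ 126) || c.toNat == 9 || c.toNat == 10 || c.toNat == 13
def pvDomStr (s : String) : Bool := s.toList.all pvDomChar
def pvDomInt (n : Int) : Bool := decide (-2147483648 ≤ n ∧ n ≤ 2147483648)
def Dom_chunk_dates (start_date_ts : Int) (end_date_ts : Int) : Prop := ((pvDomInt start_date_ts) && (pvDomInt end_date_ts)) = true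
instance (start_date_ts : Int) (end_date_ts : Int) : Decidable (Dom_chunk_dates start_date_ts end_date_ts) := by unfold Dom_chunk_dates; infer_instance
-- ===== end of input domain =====

-- B replaces A's stateful while-loop by a closed-form chunk count (ceiling division): the n-1
-- full chunks come straight from their index, and only the last chunk is clamped. Objective:
-- an alternative, stateless decomposition; equal return value proved below.

-- ===== PORT A =====
-- the while-loop: step is A's constant int(365*24*60*60) = 31536000
def chunk_dates_go (end_date_ts : Int) (after_ts : Int) : List (Int × Int) :=
  if after_ts < end_date_ts then
    let before_ts := min end_date_ts (after_ts + 31536000)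
    (after_ts, before_ts) :: chunk_dates_go end_date_ts (before_ts + 1)
  else []
termination_by (end_date_ts - after_ts).toNat
decreasing_by simp only [min_def]; split_ifs <;> omega

def chunk_dates (start_date_ts : Int) (end_date_ts : Int) : List (Int × Int) :=
  -- _SLICE_RANGE = 365; step = int(365*24*60*60)
  chunk_dates_go end_date_ts start_date_ts

-- ===== PORT B =====
def chunk_dates_alt (start_date_ts : Int) (end_date_ts : Int) : List (Int × Int) :=
  let step : Int := 365 * 24 * 60 * 60
  let span := end_date_ts - start_date_ts
  if span ≤ 0 then []
  else
    -- n = -(-span // (step + 1)) : ceiling division, the total number of chunks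
    let n : Int := -(PySem.Int.floordiv (-span) (step + 1))
    -- every chunk but the last is full-length: no clamping
    ((List.range (n - 1).toNat).map (fun (i : Nat) =>
        let a := start_date_ts + (i : Int) * (step + 1)
        (a, a + step)))
      ++ [(start_date_ts + (n - 1) * (step + 1),
           min end_date_ts (start_date_ts + (n - 1) * (step + 1) + step))]

-- ===== PRECONDITION & SPEC =====
def Spec_chunk_dates (start_date_ts : Int) (end_date_ts : Int) (out : List (Int × Int)) : Prop := out = chunk_dates_alt start_date_ts end_date_ts
instance (start_date_ts : Int) (end_date_ts : Int) (out : List (Int × Int)) : Decidable (Spec_chunk_dates start_date_ts end_date_ts out) := by unfold Spec_chunk_dates; infer_instance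

-- ===== CLAIM =====
def Claim_equal_chunk_dates : Prop := ∀ (start_date_ts : Int) (end_date_ts : Int), Dom_chunk_dates start_date_ts end_date_ts → Spec_chunk_dates start_date_ts end_date_ts (chunk_dates start_date_ts end_date_ts)

-- ===== LEMMAS AND PROOFS =====

lemma pyRange_pos_cons (a b s : Int) (hs : 0 < s) (h : a < b) :
    PySem.List.pyRange a b s = a :: PySem.List.pyRange (a + s) b s := by
  rw [PySem.List.pyRange_of_pos a b hs, PySem.List.pyRange_of_pos (a + s) b hs]
  by_cases h2 : a + s < b
  · simp only [if_pos h, if_pos h2]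
    have hn : ((b - a + s - 1) / s).toNat = ((b - (a + s) + s - 1) / s).toNat + 1 := by
      have he : (b - a + s - 1) / s = (b - (a + s) + s - 1) / s + 1 := by
        have := Int.add_mul_ediv_right (b - (a + s) + s - 1) 1 (by omega : s ≠ 0)
        rw [← this]; ring_nf
      rw [he]
      have h0 : 0 ≤ (b - (a + s) + s - 1) / s := Int.ediv_nonneg (by omega) (by omega)
      omega
    rw [hn, List.range_succ_eq_map]
    simp only [List.map_cons, List.map_map]
    congr 1
    · simp
    · apply List.map_congr_left; intro k _; simp [Function.comp]; ring
  · simp only [if_pos h, if_neg h2]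
    have hn : ((b - a + s - 1) / s).toNat = 1 := by
      have h1 : 1 ≤ (b - a + s - 1) / s := by
        rw [Int.le_ediv_iff_mul_le hs]; omega
      have h2' : (b - a + s - 1) / s < 2 := by
        rw [Int.ediv_lt_iff_lt_mul hs]; omega
      omega
    rw [hn]
    simp

lemma pyRange_pos_nil (a b s : Int) (hs : 0 < s) (h : b ≤ a) :
    PySem.List.pyRange a b s = [] := by
  rw [PySem.List.pyRange_of_pos a b hs]
  simp [show ¬ a < b by omega]

-- A's loop as a map over the arithmetic progression of chunk starts
lemma chunk_dates_go_eq (e a : Int) :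
    chunk_dates_go e a
      = (PySem.List.pyRange a e 31536001).map (fun t => (t, min e (t + 31536000))) := by
  by_cases h : a < e
  · rw [chunk_dates_go, if_pos h,
        pyRange_pos_cons a e 31536001 (by norm_num) h, List.map_cons]
    by_cases h2 : a + 31536000 < e
    · have hm : min e (a + 31536000) = a + 31536000 := by omega
      simp only [hm]
      congr 1
      have := chunk_dates_go_eq e (a + 31536000 + 1)
      rw [this]
      norm_num [add_assoc]
    · have hm : min e (a + 31536000) = e := by omega
      simp only [hm]
      congr 1
      rw [chunk_dates_go, if_neg (by omega : ¬ e + 1 < e),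
          pyRange_pos_nil (a + 31536001) e 31536001 (by norm_num) (by omega)]
      simp
  · rw [chunk_dates_go, if_neg h,
        pyRange_pos_nil a e 31536001 (by norm_num) (by omega)]
    simp
termination_by (e - a).toNat
decreasing_by omega

-- B's closed-form construction (ceiling count, full chunks + clamped last) equals the same map
lemma chunk_dates_alt_eq (s e : Int) :
    chunk_dates_alt s e
      = (PySem.List.pyRange s e 31536001).map (fun t => (t, min e (t + 31536000))) := by
  simp only [chunk_dates_alt]
  norm_num
  by_cases h : e ≤ s
  · rw [if_pos h, pyRange_pos_nil s e 31536001 (by norm_num) h]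
    rfl
  · rw [if_neg h,
        PySem.List.pyRange_of_pos s e (by norm_num : (0:Int) < 31536001),
        if_pos (by omega : s < e)]
    have hcnt : ((e - s + 31536001 - 1) / 31536001).toNat
        = ((-((s - e) / 31536001)).toNat - 1) + 1 := by omega
    rw [hcnt, List.range_succ, List.map_append]
    rw [List.map_append, List.map_map, List.map_map]
    congr 1
    · apply List.map_congr_left
      intro i hi
      simp only [List.mem_range] at hi
      simp only [Function.comp, Prod.ext_iff, min_def]
      split_ifs <;> constructor <;> omega
    · simp only [Function.comp, List.map_cons, List.map_nil, List.cons.injEq, and_true,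
        Prod.ext_iff, min_def]
      split_ifs <;> constructor <;> omega

-- ===== VERDICT =====
theorem chunk_dates_spec : Claim_equal_chunk_dates := by
  intro s e _
  unfold Spec_chunk_dates chunk_dates
  rw [chunk_dates_go_eq, chunk_dates_alt_eq]
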